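-- pv_equiv track=rewrite | github.com/omarkhaled-auto/agent-team-v18 | src/agent_team_v15/constitution_writer.py | _truncate_to_section_boundary
-- ===== SOURCE A (Python) =====
-- class AgentsMdOverflowError(RuntimeError):
--     """Raised when AGENTS.md exceeds `agents_md_max_bytes` and cannot be
--     safely truncated to a complete section boundary."""
--
-- def _truncate_to_section_boundary(content: str, max_bytes: int) -> str:
--     """Truncate `content` to the last complete `^## ` section within `max_bytes`."""
--     encoded = content.encode("utf-8")
--     if len(encoded) <= max_bytes:
--         return content
--     # Walk sections (top-level `## ` headers) and keep the last boundary that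
--     # fits within max_bytes.
--     lines = content.splitlines(keepends=True)
--     cumulative = 0
--     last_safe_index = 0
--     for idx, line in enumerate(lines):
--         cumulative += len(line.encode("utf-8"))
--         if cumulative > max_bytes:
--             break
--         if line.startswith("## "):
--             last_safe_index = idx
--     if last_safe_index == 0:
--         raise AgentsMdOverflowError(
--             f"AGENTS.md cannot be truncated to a section boundary under {max_bytes} bytes"
--         )
--     truncated = "".join(lines[:last_safe_index])
--     truncated += (
--         "\n<!-- AGENTS.md truncated at section boundary; see source templates "
--         "for full content. -->\n"
--     )
--     return truncated
-- ===== SOURCE B (Python) =====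
-- class AgentsMdOverflowError(RuntimeError):
--     """Raised when AGENTS.md exceeds `agents_md_max_bytes` and cannot be
--     safely truncated to a complete section boundary."""
--
--
-- def _truncate_to_section_boundary(content: str, max_bytes: int) -> str:
--     """Truncate `content` to the last complete `^## ` section within `max_bytes`."""
--     if len(content.encode("utf-8")) <= max_bytes:
--         return content
--     lines = content.splitlines(keepends=True)
--     # Inclusive running byte totals per line, and the indices of `## ` headers.
--     totals = []
--     running = 0
--     for line in lines:
--         running += len(line.encode("utf-8"))
--         totals.append(running)
--     header_idxs = [i for i, line in enumerate(lines) if line.startswith("## ")]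
--     # Pick the largest header index (other than 0) whose cumulative total fits.
--     for i in reversed(header_idxs):
--         if i > 0 and totals[i] <= max_bytes:
--             return "".join(lines[:i]) + (
--                 "\n<!-- AGENTS.md truncated at section boundary; see source templates "
--                 "for full content. -->\n"
--             )
--     raise AgentsMdOverflowError(
--         f"AGENTS.md cannot be truncated to a section boundary under {max_bytes} bytes"
--     )
-- ===== Notes on version B (the rewrite author's own statement) =====
-- stated objective: alternative
-- what changed: Replaces A's single forward loop (running byte total, break on overflow, remember-last-header) by a build-index-then-reverse-scan: B first builds the per-line inclusive byte totals and the list of '## ' header line indices, then scans the header indices from the largest down and returns at the first that fits; correctness of dropping the break relies on monotonicity of the running totals.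
import Mathlib
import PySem

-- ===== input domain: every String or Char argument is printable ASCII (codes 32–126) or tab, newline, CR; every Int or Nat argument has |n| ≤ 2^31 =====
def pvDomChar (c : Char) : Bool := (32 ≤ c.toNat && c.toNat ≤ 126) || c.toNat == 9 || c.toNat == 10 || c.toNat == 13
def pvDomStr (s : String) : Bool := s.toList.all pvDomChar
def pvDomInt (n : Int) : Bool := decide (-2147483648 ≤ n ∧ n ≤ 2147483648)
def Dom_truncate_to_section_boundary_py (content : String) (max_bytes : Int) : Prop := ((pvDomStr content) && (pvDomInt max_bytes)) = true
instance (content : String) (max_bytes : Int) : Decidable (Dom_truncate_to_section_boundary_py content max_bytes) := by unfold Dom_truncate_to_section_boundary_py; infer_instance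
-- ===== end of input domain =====

-- B replaces A's single forward running-best loop (with break) by build-index-then-reverse-scan:
-- it first builds the per-line inclusive byte totals and the list of `## ` header indices, then
-- scans the header indices from the largest down for the first that fits (objective: alternative).
-- On the Dom alphabet every char is one UTF-8 byte, so byte length = char count in both ports.

-- shared helpers (both Pythons call the same built-ins):
-- exact port of str.splitlines(keepends=True) on the Dom alphabet: line breaks are '\n', '\r', '\r\n'
-- (the other Unicode line breaks Python recognises do not occur in Dom strings).
def pvSplitKeep (acc : List Char) : List Char → List (List Char)
  | [] => if acc.isEmpty then [] else [acc.reverse]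
  | '\r' :: '\n' :: rest => (acc.reverse ++ ['\r', '\n']) :: pvSplitKeep [] rest
  | '\n' :: rest => (acc.reverse ++ ['\n']) :: pvSplitKeep [] rest
  | '\r' :: rest => (acc.reverse ++ ['\r']) :: pvSplitKeep [] rest
  | c :: rest => pvSplitKeep (c :: acc) rest

-- line.startswith("## ")
def pvIsHdr (l : List Char) : Bool := PySem.Chars.startswith l ['#', '#', ' ']

def pvComment : String :=
  "\n<!-- AGENTS.md truncated at section boundary; see source templates for full content. -->\n"

-- ===== PORT A =====
-- A's forward loop: enumerate lines, accumulate bytes, break on overflow, remember last header index.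
def pvLoopA (mb : Int) : List (List Char) → Nat → Nat → Nat → Nat
  | [], _idx, _cum, last => last
  | l :: rest, idx, cum, last =>
    let cum' := cum + l.length
    if mb < (cum' : Int) then last
    else pvLoopA mb rest (idx + 1) cum' (if pvIsHdr l then idx else last)

def truncate_to_section_boundary_py (content : String) (max_bytes : Int) : String :=
  if (content.toList.length : Int) ≤ max_bytes then content
  else
    let lines := pvSplitKeep [] content.toList
    let lastSafe := pvLoopA max_bytes lines 0 0 0
    if lastSafe = 0 then ""   -- Python raises AgentsMdOverflowError here; excluded by Pre_
    else String.ofList ((lines.take lastSafe).flatten) ++ pvComment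

-- ===== PORT B =====
-- inclusive running byte totals per line
def pvTotals (running : Nat) : List (List Char) → List Nat
  | [] => []
  | l :: rest => (running + l.length) :: pvTotals (running + l.length) rest

def truncate_to_section_boundary_py_alt (content : String) (max_bytes : Int) : String :=
  if (content.toList.length : Int) ≤ max_bytes then content
  else
    let lines := pvSplitKeep [] content.toList
    let totals := pvTotals 0 lines
    -- enumerate(lines): line–index pairs (indices as Nat, since they index `lines`)
    let headerIdxs := (lines.zipIdx.filter (fun p => pvIsHdr p.1)).map (·.2)
    match headerIdxs.reverse.find?
        (fun i => decide (0 < i) && decide ((totals.getD i 0 : Int) ≤ max_bytes)) with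
    | some i => String.ofList ((lines.take i).flatten) ++ pvComment
    | none => ""   -- Python raises AgentsMdOverflowError here; excluded by Pre_

-- ===== PRECONDITION & SPEC =====
-- position p of cs is the start of a (non-first) line: the previous char ends a line
def pvLineStart (cs : List Char) (p : Nat) : Bool :=
  cs.getD (p - 1) ' ' == '\n' || (cs.getD (p - 1) ' ' == '\r' && cs.getD p ' ' != '\n')

-- Pre_ excludes exactly the inputs where A raises AgentsMdOverflowError: the content overflows
-- max_bytes, and no line after the first both starts with "## " and ends within max_bytes
-- (a line at position s ends within max_bytes iff some later line boundary e is ≤ max_bytes).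
def Pre_truncate_to_section_boundary_py (content : String) (max_bytes : Int) : Prop :=
  (content.toList.length : Int) ≤ max_bytes ∨
    ∃ s ∈ List.range content.toList.length,
      0 < s ∧ pvLineStart content.toList s = true ∧
      PySem.Chars.startswith (content.toList.drop s) ['#', '#', ' '] = true ∧
      ∃ e ∈ List.range (content.toList.length + 1),
        s < e ∧ (e : Int) ≤ max_bytes ∧
        (e = content.toList.length ∨ pvLineStart content.toList e = true)

instance (content : String) (max_bytes : Int) :
    Decidable (Pre_truncate_to_section_boundary_py content max_bytes) := by
  unfold Pre_truncate_to_section_boundary_py; infer_instance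

def pvWitness_truncate_to_section_boundary_py : String × Int :=
  ("T\n## A\nbody\n## B\nmore\n", 7)

def Spec_truncate_to_section_boundary_py (content : String) (max_bytes : Int) (out : String) : Prop := out = truncate_to_section_boundary_py_alt content max_bytes
instance (content : String) (max_bytes : Int) (out : String) : Decidable (Spec_truncate_to_section_boundary_py content max_bytes out) := by unfold Spec_truncate_to_section_boundary_py; infer_instance

-- ===== CLAIM (what is proved, stated in full; the proofs are below) =====
def Claim_equal_truncate_to_section_boundary_py : Prop := ∀ (content : String) (max_bytes : Int), Dom_truncate_to_section_boundary_py content max_bytes → Pre_truncate_to_section_boundary_py content max_bytes → Spec_truncate_to_section_boundary_py content max_bytes (truncate_to_section_boundary_py content max_bytes)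

-- ===== LEMMAS AND PROOFS =====

-- cumulative byte count of the first j lines
def pvCum (lines : List (List Char)) (j : Nat) : Nat := ((lines.take j).map List.length).sum
-- find? respects pointwise-equal predicates on the members
theorem pvFind?_congr {α : Type} (p q : α → Bool) :
    ∀ (l : List α), (∀ x ∈ l, p x = q x) → l.find? p = l.find? q := by
  intro l
  induction l with
  | nil => intro _; rfl
  | cons a t ih =>
    intro h
    cases hpa : p a
    · rw [List.find?_cons_of_neg (by simp [hpa]),
        List.find?_cons_of_neg (by simp [← h a (by simp), hpa])]
      exact ih (fun x hx => h x (by simp [hx]))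
    · rw [List.find?_cons_of_pos (by simp [hpa]),
        List.find?_cons_of_pos (by simp [← h a (by simp), hpa])]

-- transfer facts between A's find (predicate p) and B's find (q = (0 < ·) && p)
theorem pvFindQ_some (p q : Nat → Bool) :
    ∀ (l : List Nat), (∀ x ∈ l, q x = (decide (0 < x) && p x)) →
      ∀ j, l.find? p = some j → j ≠ 0 → l.find? q = some j := by
  intro l
  induction l with
  | nil => intro _ j h; simp at h
  | cons a t ih =>
    intro hq j hfind hj
    cases hpa : p a
    · rw [List.find?_cons_of_neg (by simp [hpa])] at hfind
      rw [List.find?_cons_of_neg (by simp [hq a (by simp), hpa])]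
      exact ih (fun x hx => hq x (by simp [hx])) j hfind hj
    · rw [List.find?_cons_of_pos (by simp [hpa])] at hfind
      injection hfind with h; subst h
      rw [List.find?_cons_of_pos
        (by simp [hq a (by simp), hpa, Nat.pos_of_ne_zero hj])]

theorem pvFindQ_none_of_zero (p q : Nat → Bool) :
    ∀ (l : List Nat), (∀ x ∈ l, q x = (decide (0 < x) && p x)) →
      l.Pairwise (· > ·) → l.find? p = some 0 → l.find? q = none := by
  intro l
  induction l with
  | nil => intro _ _ h; simp at h
  | cons a t ih =>
    intro hq hpw hfind
    cases hpa : p a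
    · rw [List.find?_cons_of_neg (by simp [hpa])] at hfind
      rw [List.find?_cons_of_neg (by simp [hq a (by simp), hpa])]
      exact ih (fun x hx => hq x (by simp [hx])) (List.pairwise_cons.mp hpw).2 hfind
    · rw [List.find?_cons_of_pos (by simp [hpa])] at hfind
      injection hfind with h; subst h
      have ht : t = [] := by
        rcases t with _ | ⟨b, t'⟩
        · rfl
        · exfalso; have := (List.pairwise_cons.mp hpw).1 b (by simp); omega
      subst ht
      rw [List.find?_cons_of_neg (by simp [hq 0 (by simp)])]
      rfl

theorem pvFindQ_none (p q : Nat → Bool) (l : List Nat)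
    (hq : ∀ x ∈ l, q x = (decide (0 < x) && p x)) :
    l.find? p = none → l.find? q = none := by
  intro h
  rw [List.find?_eq_none] at h ⊢
  intro x hx
  rw [hq x hx]
  simp [h x hx]

-- the reversed range [n, …, 1, 0]
theorem pvRevRange_succ (n : Nat) :
    (List.range (n + 1)).reverse = ((List.range n).reverse.map (· + 1)) ++ [0] := by
  rw [List.range_succ_eq_map]
  simp [List.map_reverse]

theorem pvCum_succ_cons (l : List Char) (rest : List (List Char)) (j : Nat) :
    pvCum (l :: rest) (j + 1) = l.length + pvCum rest j := by
  simp [pvCum, List.take_succ_cons]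

-- characterisation of A's forward loop as a reverse-scan find over all line indices
theorem pvLoopA_char (mb : Int) (lines : List (List Char)) :
    ∀ (idx cum last : Nat),
      pvLoopA mb lines idx cum last =
        match (List.range lines.length).reverse.find?
            (fun j => pvIsHdr (lines.getD j []) &&
              decide (((cum + pvCum lines (j + 1) : Nat) : Int) ≤ mb)) with
        | some j => idx + j
        | none => last := by
  induction lines with
  | nil => intro idx cum last; simp [pvLoopA]
  | cons l rest ih =>
    intro idx cum last
    simp only [pvLoopA, List.length_cons]
    by_cases hbr : mb < ((cum + l.length : Nat) : Int)
    · rw [if_pos hbr]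
      have hnone : (List.range (rest.length + 1)).reverse.find?
          (fun j => pvIsHdr ((l :: rest).getD j []) &&
            decide (((cum + pvCum (l :: rest) (j + 1) : Nat) : Int) ≤ mb)) = none := by
        rw [List.find?_eq_none]
        intro j _
        have h1 : pvCum (l :: rest) (j + 1) = l.length + pvCum rest j :=
          pvCum_succ_cons l rest j
        simp only [Bool.and_eq_true, decide_eq_true_eq, not_and]
        intro _
        rw [h1]
        push_cast at hbr ⊢
        omega
      rw [hnone]
    · rw [if_neg hbr]
      rw [ih (idx + 1) (cum + l.length) (if pvIsHdr l then idx else last)]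
      rw [pvRevRange_succ, List.find?_append, List.find?_map]
      have hpt : ((fun j => pvIsHdr ((l :: rest).getD j []) &&
              decide (((cum + pvCum (l :: rest) (j + 1) : Nat) : Int) ≤ mb)) ∘ (· + 1)) =
          (fun j => pvIsHdr (rest.getD j []) &&
              decide ((((cum + l.length) + pvCum rest (j + 1) : Nat) : Int) ≤ mb)) := by
        funext j
        simp only [Function.comp_apply, List.getD_cons_succ]
        congr 1
        rw [pvCum_succ_cons]
        apply decide_eq_decide.mpr
        push_cast
        omega
      rw [hpt]
      cases hfr : (List.range rest.length).reverse.find?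
          (fun j => pvIsHdr (rest.getD j []) &&
            decide ((((cum + l.length) + pvCum rest (j + 1) : Nat) : Int) ≤ mb)) with
      | some j =>
        simp only [Option.map_some]
        rw [Option.some_or]
        show idx + 1 + j = idx + (j + 1)
        omega
      | none =>
        simp only [Option.map_none, Option.none_or]
        have h0 : pvCum (l :: rest) 1 = l.length := by
          simpa using pvCum_succ_cons l rest 0
        cases hhd : pvIsHdr l
        · rw [List.find?_cons_of_neg (by simp [hhd]), List.find?_nil]
          simp
        · rw [List.find?_cons_of_pos (by simp [hhd, h0]; omega)]
          simp

-- B's totals table holds the inclusive cumulative byte counts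
theorem pvTotals_getD (lines : List (List Char)) :
    ∀ (run i : Nat), i < lines.length →
      (pvTotals run lines).getD i 0 = run + pvCum lines (i + 1) := by
  induction lines with
  | nil => intro run i h; simp at h
  | cons l rest ih =>
    intro run i h
    cases i with
    | zero =>
      simp only [pvTotals, List.getD_cons_zero]
      rw [pvCum_succ_cons]
      simp [pvCum]
    | succ i =>
      simp only [pvTotals, List.getD_cons_succ]
      rw [ih (run + l.length) i (by simpa using h), pvCum_succ_cons]
      omega

-- B's header-index list is the filtered index range
theorem pvHeaders_eq (lines : List (List Char)) :
    ∀ (k : Nat),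
      ((lines.zipIdx k).filter (fun p => pvIsHdr p.1)).map (·.2) =
        ((List.range lines.length).filter (fun j => pvIsHdr (lines.getD j []))).map (· + k) := by
  induction lines with
  | nil => intro k; simp
  | cons l rest ih =>
    intro k
    simp only [List.zipIdx_cons, List.length_cons]
    rw [List.range_succ_eq_map]
    have htail :
        ((List.range rest.length).filter
            ((fun j => pvIsHdr ((l :: rest).getD j [])) ∘ Nat.succ)) =
          (List.range rest.length).filter (fun j => pvIsHdr (rest.getD j [])) := by
      apply List.filter_congr
      intro j _
      simp
    cases hhd : pvIsHdr l
    · rw [List.filter_cons_of_neg (by simp [hhd]),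
        List.filter_cons_of_neg (by simp [hhd]),
        List.filter_map, htail, List.map_map, ih (k + 1)]
      apply List.map_congr_left
      intro j _
      simp only [Function.comp_apply]
      omega
    · rw [List.filter_cons_of_pos (by simp [hhd]),
        List.filter_cons_of_pos (by simp [hhd]),
        List.filter_map, htail, List.map_cons, List.map_cons, ih (k + 1), List.map_map]
      congr 1
      · omega
      · apply List.map_congr_left
        intro j _
        simp only [Function.comp_apply]
        omega

-- find? over a filtered list
theorem pvFind?_filter {α : Type} (p q : α → Bool) :
    ∀ (l : List α), (l.filter q).find? p = l.find? (fun x => q x && p x) := by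
  intro l
  induction l with
  | nil => rfl
  | cons a t ih =>
    cases hq : q a
    · rw [List.filter_cons_of_neg (by simp [hq]),
        List.find?_cons_of_neg (by simp [hq]), ih]
    · rw [List.filter_cons_of_pos (by simp [hq])]
      cases hp : p a
      · rw [List.find?_cons_of_neg (by simp [hp]),
          List.find?_cons_of_neg (by simp [hq, hp]), ih]
      · rw [List.find?_cons_of_pos (by simp [hp]),
          List.find?_cons_of_pos (by simp [hq, hp])]

-- ===== VERDICT (by name: the statement is the Claim_ definition above) =====
theorem truncate_to_section_boundary_py_spec : Claim_equal_truncate_to_section_boundary_py := by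
  intro content mb _hdom _hpre
  unfold Spec_truncate_to_section_boundary_py truncate_to_section_boundary_py
    truncate_to_section_boundary_py_alt
  by_cases hfit : (content.toList.length : Int) ≤ mb
  · rw [if_pos hfit, if_pos hfit]
  · simp only [if_neg hfit]
    set lines := pvSplitKeep [] content.toList with hlines
    rw [pvLoopA_char mb lines 0 0 0]
    have hheads : ((lines.zipIdx.filter (fun p => pvIsHdr p.1)).map (·.2)) =
        (List.range lines.length).filter (fun j => pvIsHdr (lines.getD j [])) := by
      simpa using pvHeaders_eq lines 0
    rw [hheads, ← List.filter_reverse, pvFind?_filter]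
    have hcong : (List.range lines.length).reverse.find?
        (fun x => pvIsHdr (lines.getD x []) &&
          (decide (0 < x) && decide ((((pvTotals 0 lines).getD x 0 : Nat) : Int) ≤ mb))) =
      (List.range lines.length).reverse.find?
        (fun x => decide (0 < x) && (pvIsHdr (lines.getD x []) &&
          decide (((0 + pvCum lines (x + 1) : Nat) : Int) ≤ mb))) := by
      apply pvFind?_congr
      intro x hx
      have hxlt : x < lines.length := by simpa using hx
      rw [pvTotals_getD lines 0 x hxlt]
      cases pvIsHdr (lines.getD x []) <;> cases hx0 : decide (0 < x) <;> simp
    rw [hcong]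
    have hpw : ((List.range lines.length).reverse).Pairwise (· > ·) := by
      rw [List.pairwise_reverse]
      simpa [flip] using List.pairwise_lt_range (n := lines.length)
    cases hfa : (List.range lines.length).reverse.find?
        (fun j => pvIsHdr (lines.getD j []) &&
          decide (((0 + pvCum lines (j + 1) : Nat) : Int) ≤ mb)) with
    | none =>
      rw [pvFindQ_none _ _ _ (fun x _ => rfl) hfa]
      simp
    | some j =>
      by_cases hj : j = 0
      · subst hj
        rw [pvFindQ_none_of_zero _ _ _ (fun x _ => rfl) hpw hfa]
        simp
      · rw [pvFindQ_some _ _ _ (fun x _ => rfl) j hfa hj]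
        simp [hj]
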